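-- pv_equiv track=rewrite | github.com/KULeuven-MICAS/HeMAiA | target/sw/device/runtime/snax/versacore/validate_shapes.py | _channel_enable_bits
-- ===== SOURCE A (Python) =====
-- def _channel_enable_bits(bits: int, csr_num: int) -> list[int]:
--     out = [0] * csr_num
--     for i in range(bits):
--         idx, pos = i // 32, i % 32
--         if idx < csr_num:
--             out[idx] |= 1 << pos
--     out.reverse()
--     return [int(x) for x in out]
-- ===== SOURCE B (Python) =====
-- def _channel_enable_bits(bits: int, csr_num: int) -> list[int]:
--     def word(k: int) -> int:
--         r = bits - 32 * k
--         if r >= 32: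
--             return 0xFFFFFFFF
--         if r > 0:
--             return (1 << r) - 1
--         return 0
--     return [word(k) for k in range(csr_num - 1, -1, -1)]
-- ===== Notes on version B (the rewrite author's own statement) =====
-- stated objective: faster
-- what changed: B computes each 32-bit word directly by a closed form (all-ones, partial mask (1<<(bits-32k))-1, or 0) while iterating over the csr_num words in reverse, instead of A's per-bit loop that ORs one bit at a time into a forward list and then reverses it.
import Mathlib
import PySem

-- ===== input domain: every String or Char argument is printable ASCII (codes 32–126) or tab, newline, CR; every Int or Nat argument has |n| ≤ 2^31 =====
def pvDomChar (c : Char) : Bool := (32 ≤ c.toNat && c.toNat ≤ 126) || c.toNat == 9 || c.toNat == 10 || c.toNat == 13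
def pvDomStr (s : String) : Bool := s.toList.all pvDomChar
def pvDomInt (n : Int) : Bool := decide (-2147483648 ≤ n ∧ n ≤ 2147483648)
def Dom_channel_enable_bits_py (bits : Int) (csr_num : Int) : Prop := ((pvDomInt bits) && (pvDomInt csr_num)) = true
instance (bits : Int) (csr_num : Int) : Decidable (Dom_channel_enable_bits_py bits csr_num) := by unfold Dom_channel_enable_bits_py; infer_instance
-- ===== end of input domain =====

-- B computes each 32-bit word by a closed form (O(csr_num)) instead of A's per-bit loop (O(bits)); return values agree everywhere.

-- ===== PORT A =====
-- one iteration of A's 'for i in range(bits)' loop body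
def chanStep (csr_num : Int) (out : List Int) (i : Int) : List Int :=
  let idx := PySem.Int.floordiv i 32
  let pos := PySem.Int.mod i 32
  if idx < csr_num then
    out.set idx.toNat (PySem.Int.bor (out.getD idx.toNat 0) ((1 : Int) <<< pos.toNat))
  else out

def channel_enable_bits_py (bits : Int) (csr_num : Int) : List Int :=
  let out := List.replicate csr_num.toNat (0 : Int)
  let out := (PySem.List.pyRange 0 bits 1).foldl (chanStep csr_num) out
  (out.reverse).map (fun x => x)

-- ===== PORT B =====
-- B's helper word(k): the value of CSR word k in closed form
def chanWord (bits : Int) (k : Int) : Int :=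
  let r := bits - 32 * k
  if 32 ≤ r then 4294967295
  else if 0 < r then (1 : Int) <<< r.toNat - 1
  else 0

def channel_enable_bits_py_alt (bits : Int) (csr_num : Int) : List Int :=
  (PySem.List.pyRange (csr_num - 1) (-1) (-1)).map (chanWord bits)

-- ===== PRECONDITION & SPEC =====
def Spec_channel_enable_bits_py (bits : Int) (csr_num : Int) (out : List Int) : Prop := out = channel_enable_bits_py_alt bits csr_num
instance (bits : Int) (csr_num : Int) (out : List Int) : Decidable (Spec_channel_enable_bits_py bits csr_num out) := by unfold Spec_channel_enable_bits_py; infer_instance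

-- ===== CLAIM (what is proved, stated in full; the proofs are below) =====
def Claim_equal_channel_enable_bits_py : Prop := ∀ (bits : Int) (csr_num : Int), Dom_channel_enable_bits_py bits csr_num → Spec_channel_enable_bits_py bits csr_num (channel_enable_bits_py bits csr_num)

-- ===== LEMMAS AND PROOFS =====

-- word k's value after the first n bits have been processed
def maskN (n k : Nat) : Int := 2 ^ (min 32 (n - 32 * k)) - 1

lemma bit_identity (p : Nat) (hp : p < 32) :
    PySem.Int.bor ((2 : Int) ^ p - 1) ((1 : Int) <<< p) = 2 ^ (p + 1) - 1 := by
  interval_cases p <;> decide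

lemma set_map_range (m : Nat) (f : Nat → Int) (j : Nat) (v : Int) :
    ((List.range m).map f).set j v
      = (List.range m).map (fun k => if k = j then v else f k) := by
  apply List.ext_getElem
  · simp
  · intro i h1 h2
    simp only [List.getElem_set, List.getElem_map, List.getElem_range]
    by_cases hji : j = i
    · simp [hji]
    · simp [hji, Ne.symm hji]

lemma getD_map_range_eq (m : Nat) (f : Nat → Int) (j : Nat) (hj : j < m) :
    ((List.range m).map f).getD j 0 = f j := by
  rw [List.getD_eq_getElem _ _ (by simpa using hj)]
  simp

lemma chanStep_nat (c : Int) (n : Nat) :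
    chanStep c ((List.range c.toNat).map (fun k => maskN n k)) (n : Int)
      = (List.range c.toNat).map (fun k => maskN (n + 1) k) := by
  unfold chanStep
  have hdiv : PySem.Int.floordiv (n : Int) 32 = ((n / 32 : Nat) : Int) := by
    exact_mod_cast PySem.Int.floordiv_natCast n 32
  have hmod : PySem.Int.mod (n : Int) 32 = ((n % 32 : Nat) : Int) := by
    exact_mod_cast PySem.Int.mod_natCast n 32
  simp only [hdiv, hmod]
  by_cases hc : ((n / 32 : Nat) : Int) < c
  · have hcpos : 0 < c := lt_of_le_of_lt (by positivity) hc
    have hlt : n / 32 < c.toNat := by omega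
    simp only [if_pos hc, Int.toNat_natCast]
    rw [getD_map_range_eq _ _ _ hlt, set_map_range]
    apply List.map_congr_left
    intro k hk
    simp only [List.mem_range] at hk
    by_cases hkj : k = n / 32
    · subst hkj
      have h1 : n - 32 * (n / 32) = n % 32 := by omega
      have h2 : n + 1 - 32 * (n / 32) = n % 32 + 1 := by omega
      have hp : n % 32 < 32 := by omega
      simp only [maskN, h1, h2]
      rw [Nat.min_eq_right (by omega), Nat.min_eq_right (by omega)]
      exact bit_identity _ hp
    · have : min 32 (n - 32 * k) = min 32 (n + 1 - 32 * k) := by omega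
      simp [hkj, maskN, this]
  · -- guard fails: every index k < c.toNat lies strictly below n / 32, so its mask is unchanged
    simp only [if_neg hc]
    apply List.map_congr_left
    intro k hk
    simp only [List.mem_range] at hk
    have hklt : k < n / 32 := by omega
    have : min 32 (n - 32 * k) = min 32 (n + 1 - 32 * k) := by omega
    simp [maskN, this]

lemma loop_eq (c : Int) (n : Nat) :
    (PySem.List.pyRange 0 (n : Int) 1).foldl (chanStep c)
        ((List.range c.toNat).map (fun k => maskN 0 k))
      = (List.range c.toNat).map (fun k => maskN n k) := by
  induction n with
  | zero => simp [PySem.List.pyRange_one_eq_nil]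
  | succ n ih =>
    have h : ((n + 1 : Nat) : Int) = (n : Int) + 1 := by push_cast; ring
    rw [h, PySem.List.pyRange_one_succ_right (by positivity), List.foldl_append]
    simp only [List.foldl_cons, List.foldl_nil, ih]
    exact chanStep_nat c n

lemma replicate_eq_map_mask (m : Nat) :
    List.replicate m (0 : Int) = (List.range m).map (fun k => maskN 0 k) := by
  have : ∀ k, maskN 0 k = 0 := by intro k; simp [maskN]
  simp [this, List.map_const']

lemma chanWord_eq_mask (bits : Int) (k : Nat) :
    chanWord bits (k : Int) = maskN bits.toNat k := by
  show (if 32 ≤ bits - 32 * (k : Int) then (4294967295 : Int)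
        else if 0 < bits - 32 * (k : Int) then (1 : Int) <<< (bits - 32 * (k : Int)).toNat - 1
        else 0) = 2 ^ (min 32 (bits.toNat - 32 * k)) - 1
  by_cases h1 : 32 ≤ bits - 32 * (k : Int)
  · have hm : min 32 (bits.toNat - 32 * k) = 32 := by omega
    rw [if_pos h1, hm]
    norm_num
  · by_cases h2 : 0 < bits - 32 * (k : Int)
    · have hr : (bits - 32 * (k : Int)).toNat = bits.toNat - 32 * k := by omega
      have hm : min 32 (bits.toNat - 32 * k) = bits.toNat - 32 * k := by omega
      have hsh : (1 : Int) <<< (bits.toNat - 32 * k) = 2 ^ (bits.toNat - 32 * k) := by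
        rw [Int.shiftLeft_eq]; ring
      rw [if_neg h1, if_pos h2, hr, hm, hsh]
    · have hm : min 32 (bits.toNat - 32 * k) = 0 := by omega
      rw [if_neg h1, if_neg h2, hm]
      norm_num

lemma alt_eq (bits c : Int) :
    channel_enable_bits_py_alt bits c
      = ((List.range c.toNat).map (fun k => maskN bits.toNat k)).reverse := by
  unfold channel_enable_bits_py_alt
  rw [PySem.List.pyRange_neg_one]
  have hm : ((c - 1) - (-1)).toNat = c.toNat := by omega
  rw [hm]
  apply List.ext_getElem
  · simp
  · intro i h1 h2
    simp only [List.length_map, List.length_range] at h1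
    simp only [List.getElem_map, List.getElem_range, List.getElem_reverse, List.length_map,
      List.length_range]
    have hk : c - 1 - (i : Int) = ((c.toNat - 1 - i : Nat) : Int) := by omega
    rw [hk, chanWord_eq_mask]

lemma pyRange_nonneg_cast (bits : Int) :
    PySem.List.pyRange 0 bits 1 = PySem.List.pyRange 0 (bits.toNat : Int) 1 := by
  by_cases h : 0 ≤ bits
  · rw [Int.toNat_of_nonneg h]
  · rw [PySem.List.pyRange_one_eq_nil (by omega), PySem.List.pyRange_one_eq_nil (by omega)]

-- ===== VERDICT (by name: the statement is the Claim_ definition above) =====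
theorem channel_enable_bits_py_spec : Claim_equal_channel_enable_bits_py := by
  intro bits c _
  show channel_enable_bits_py bits c = channel_enable_bits_py_alt bits c
  show ((((PySem.List.pyRange 0 bits 1).foldl (chanStep c)
      (List.replicate c.toNat (0 : Int))).reverse).map (fun x => x))
      = channel_enable_bits_py_alt bits c
  rw [alt_eq, pyRange_nonneg_cast, replicate_eq_map_mask, loop_eq]
  simp
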